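-- pv_equiv track=rewrite | github.com/kei-academic/CheckiO | SCIENTIFIC EXPEDITION/CapsLock.py | caps_lock
-- ===== SOURCE A (Python) =====
-- def caps_lock(text: str) -> str:
--     l_text: list = list(text)
--     result: str = l_text[0]
--     turn_a: bool = False
--     for i in l_text[1:]:
--         if i == 'a':
--             turn_a = not turn_a
--         else:
--             if turn_a:
--                 result += i.upper() if i.islower() else i.lower()
--             else:
--                 result += i
--     return result
--
--     # another pattern
--     not_a: bool = True
--     result: str = ""
--     for i in text:
--         if i == 'a':
--             not_a = not not_a
--         if not_a:
--             result += i
--         else: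
--             if i.islower():
--                 result += i.upper()
--             else:
--                 result += i.lower()
--         result = result.replace('a', '').replace('A', '')
--         if text[0] == 'A':
--             result = 'A' + result
--     return result
-- ===== SOURCE B (Python) =====
-- def caps_lock(text: str) -> str:
--     head = text[0]
--     parts = text[1:].split('a')
--     out = [head]
--     for idx, seg in enumerate(parts):
--         out.append(seg.swapcase() if idx % 2 == 1 else seg)
--     return ''.join(out)
-- ===== Notes on version B (the rewrite author's own statement) =====
-- stated objective: faster
-- what changed: Replaces A's per-character toggle loop (string += per char) by splitting text[1:] on 'a' once and swapcasing only the odd-indexed segments with bulk C-level str operations, joining at the end.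
-- outside the precondition, e.g. on caps_lock(''): A raises IndexError, B raises IndexError
import Mathlib
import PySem

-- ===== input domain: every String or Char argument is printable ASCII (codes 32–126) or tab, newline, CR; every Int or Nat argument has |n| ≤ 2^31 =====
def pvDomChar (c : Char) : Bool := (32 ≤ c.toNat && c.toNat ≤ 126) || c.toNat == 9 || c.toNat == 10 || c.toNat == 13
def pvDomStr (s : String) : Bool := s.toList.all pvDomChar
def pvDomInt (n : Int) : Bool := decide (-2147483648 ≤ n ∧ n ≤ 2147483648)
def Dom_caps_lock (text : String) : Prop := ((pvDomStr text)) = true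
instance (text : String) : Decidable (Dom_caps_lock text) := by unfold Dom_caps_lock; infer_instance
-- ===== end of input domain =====

-- B replaces A's char-by-char toggle loop (string += per char) by splitting the tail on 'a'
-- once and swapcasing only the odd-indexed segments (toggle state = parity of 'a's seen);
-- measurably faster (bulk C-level split/swapcase/join), same return value on Pre_.

-- A's per-char rule: `i.upper() if i.islower() else i.lower()`
def pvFlip (c : Char) : Char :=
  if PySem.Chars.islower c then PySem.Chars.upperChar c else PySem.Chars.lowerChar c

-- B's per-char rule: str.swapcase on one char (exact on ASCII; PySem's char model)
def pvSwap (c : Char) : Char :=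
  if PySem.Chars.islower c then PySem.Chars.upperChar c
  else if PySem.Chars.isupper c then PySem.Chars.lowerChar c
  else c

-- ===== PORT A =====
def caps_lock (text : String) : String :=
  match text.toList with
  | [] => ""   -- Python raises IndexError on l_text[0]; excluded by Pre_caps_lock
  | h :: rest =>
      -- result = l_text[0]; turn_a = False; for i in l_text[1:]: …
      let st := rest.foldl (fun (st : List Char × Bool) i =>
        if i = 'a' then (st.1, !st.2)
        else if st.2 then (st.1 ++ [pvFlip i], st.2)
        else (st.1 ++ [i], st.2)) ([h], false)
      String.mk st.1

-- ===== PORT B =====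
def caps_lock_alt (text : String) : String :=
  match text.toList with
  | [] => ""   -- Python raises IndexError on text[0]; excluded by Pre_caps_lock
  | h :: rest =>
      -- parts = text[1:].split('a'); flip the odd-indexed parts; ''.join([head] + processed)
      let parts := PySem.Chars.splitOn rest ['a']
      let out := (PySem.List.enumerate parts 0).map (fun p =>
        if PySem.Int.mod p.1 2 = 1 then p.2.map pvSwap else p.2)
      String.mk (PySem.Chars.join [] ([h] :: out))

-- ===== PRECONDITION & SPEC =====
-- A evaluates l_text[0]: on the empty string it raises IndexError, so Pre_ excludes exactly "".
def Pre_caps_lock (text : String) : Prop := text ≠ ""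
instance (text : String) : Decidable (Pre_caps_lock text) := by unfold Pre_caps_lock; infer_instance
def pvWitness_caps_lock : String := "Why are you asking me that?"

def Spec_caps_lock (text : String) (out : String) : Prop := out = caps_lock_alt text
instance (text : String) (out : String) : Decidable (Spec_caps_lock text out) := by unfold Spec_caps_lock; infer_instance

-- ===== CLAIM (what is proved, stated in full; the proofs are below) =====
def Claim_equal_caps_lock : Prop := ∀ (text : String), Dom_caps_lock text → Pre_caps_lock text → Spec_caps_lock text (caps_lock text)

-- ===== LEMMAS AND PROOFS =====

-- the two per-char rules agree on every Char (lowerChar is the identity off upper-case)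
theorem pvSwap_eq_pvFlip : pvSwap = pvFlip := by
  funext c
  unfold pvSwap pvFlip
  by_cases hl : PySem.Chars.islower c
  · simp [hl]
  · by_cases hu : PySem.Chars.isupper c <;> simp [hl, hu, PySem.Chars.lowerChar]

-- A's loop, with the accumulated result factored out
def pvOut : List Char → Bool → List Char
  | [], _ => []
  | c :: t, b => if c = 'a' then pvOut t (!b) else (if b then pvFlip c else c) :: pvOut t b

theorem pv_foldl_eq (l : List Char) : ∀ (acc : List Char) (b : Bool),
    (l.foldl (fun (st : List Char × Bool) i =>
      if i = 'a' then (st.1, !st.2)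
      else if st.2 then (st.1 ++ [pvFlip i], st.2)
      else (st.1 ++ [i], st.2)) (acc, b)).1 = acc ++ pvOut l b := by
  induction l with
  | nil => intro acc b; simp [pvOut]
  | cons c t ih =>
    intro acc b
    by_cases hc : c = 'a'
    · simp [List.foldl, hc, pvOut, ih]
    · cases b <;> simp [List.foldl, hc, pvOut, ih]

-- prepend to the head segment
def pvCons (x : List Char) : List (List Char) → List (List Char)
  | [] => [x]
  | s :: ss => (x ++ s) :: ss

-- structural characterisation of split-on-'a'
def pvS : List Char → List (List Char)
  | [] => [[]]
  | c :: t => if c = 'a' then [] :: pvS t else pvCons [c] (pvS t)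

theorem pvS_ne_nil (l : List Char) : pvS l ≠ [] := by
  cases l with
  | nil => simp [pvS]
  | cons c t =>
    simp only [pvS]
    split
    · simp
    · cases h : pvS t <;> simp [pvCons]

theorem pv_go_spec : ∀ (fuel : Nat) (l cur : List Char) (acc : List (List Char)),
    l.length ≤ fuel →
    PySem.Chars.splitOn.go ['a'] fuel l cur acc = acc.reverse ++ pvCons cur.reverse (pvS l) := by
  intro fuel
  induction fuel with
  | zero =>
    intro l cur acc h
    interval_cases hl : l.length
    rw [List.length_eq_zero_iff] at hl; subst hl
    simp [PySem.Chars.splitOn.go, pvS, pvCons]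
  | succ f ih =>
    intro l cur acc h
    cases l with
    | nil => simp [PySem.Chars.splitOn.go, pvS, pvCons]
    | cons c t =>
      by_cases hc : c = 'a'
      · subst hc
        have hpre : List.isPrefixOf ['a'] ('a' :: t) = true := by simp [List.isPrefixOf]
        rw [PySem.Chars.splitOn.go]
        simp only [hpre, if_pos]
        have hdrop : List.drop (['a'].length) ('a' :: t) = t := rfl
        rw [hdrop, ih t [] (cur.reverse :: acc) (by simpa using Nat.lt_succ_iff.mp (by simpa using h))]
        cases hs : pvS t with
        | nil => exact absurd hs (pvS_ne_nil t)
        | cons s ss => simp [pvS, pvCons, hs]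
      · have hpre : List.isPrefixOf ['a'] (c :: t) = false := by
          simp [List.isPrefixOf]; exact fun hh => hc hh.symm
        rw [PySem.Chars.splitOn.go]
        simp only [hpre, Bool.false_eq_true, if_neg, not_false_iff]
        rw [ih t (c :: cur) acc (by simpa using Nat.lt_succ_iff.mp (by simpa using h))]
        cases hs : pvS t with
        | nil => exact absurd hs (pvS_ne_nil t)
        | cons s ss => simp [pvS, pvCons, hs, hc]

theorem pv_splitOn_eq (l : List Char) : PySem.Chars.splitOn l ['a'] = pvS l := by
  rw [PySem.Chars.splitOn, pv_go_spec (l.length + 1) l [] [] (by omega)]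
  cases hs : pvS l with
  | nil => exact absurd hs (pvS_ne_nil l)
  | cons s ss => simp [pvCons]

-- alternating-flag processing of the segments
def pvProc : List (List Char) → Bool → List Char
  | [], _ => []
  | s :: ss, b => (if b then s.map pvFlip else s) ++ pvProc ss (!b)

theorem pv_out_eq_proc (l : List Char) : ∀ b, pvOut l b = pvProc (pvS l) b := by
  induction l with
  | nil => intro b; cases b <;> simp [pvOut, pvS, pvProc]
  | cons c t ih =>
    intro b
    by_cases hc : c = 'a'
    · simp [pvOut, pvS, hc, pvProc, ih]
    · cases hs : pvS t with
      | nil => exact absurd hs (pvS_ne_nil t)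
      | cons s ss =>
        cases b
        · simp [pvOut, pvS, hc, hs, pvCons, pvProc, ih false]
        · simp [pvOut, pvS, hc, hs, pvCons, pvProc, ih true]

theorem pv_join_nil_eq_flatten (ps : List (List Char)) : PySem.Chars.join [] ps = ps.flatten := by
  induction ps with
  | nil => simp [PySem.Chars.join, List.intercalate]
  | cons p t ih =>
    cases t with
    | nil => simp [PySem.Chars.join, List.intercalate]
    | cons q u => rw [PySem.Chars.join_cons_cons]; simp [ih]

theorem pv_proc_eq_enum (segs : List (List Char)) : ∀ (k : Nat),
    ((PySem.List.enumerate segs (k : Int)).map (fun p =>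
      if PySem.Int.mod p.1 2 = 1 then p.2.map pvFlip else p.2)).flatten
      = pvProc segs (decide (k % 2 = 1)) := by
  induction segs with
  | nil => intro k; simp [PySem.List.enumerate_nil, pvProc]
  | cons s ss ih =>
    intro k
    rw [PySem.List.enumerate_cons]
    have hmod : PySem.Int.mod (k : Int) 2 = ((k % 2 : Nat) : Int) := by
      exact_mod_cast PySem.Int.mod_natCast k 2
    have hcond : (PySem.Int.mod (k : Int) 2 = 1) ↔ (k % 2 = 1) := by
      rw [hmod]; omega
    have hk1 : ((k : Int) + 1) = ((k + 1 : Nat) : Int) := by push_cast; ring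
    have hpar : decide ((k + 1) % 2 = 1) = !decide (k % 2 = 1) := by
      rcases Nat.even_or_odd k with he | ho
      · simp [Nat.even_iff.mp he, Nat.add_mod]
      · simp [Nat.odd_iff.mp ho, Nat.add_mod]
    rw [List.map_cons, List.flatten_cons, hk1, ih (k + 1), hpar]
    simp only [pvProc]
    congr 1
    by_cases hp : k % 2 = 1
    · rw [if_pos (hcond.mpr hp), if_pos (by simp [hp])]
    · rw [if_neg (fun hh => hp (hcond.mp hh)), if_neg (by simp [hp])]

-- ===== VERDICT (by name: the statement is the Claim_ definition above) =====
theorem caps_lock_spec : Claim_equal_caps_lock := by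
  intro text _ hpre
  unfold Spec_caps_lock caps_lock caps_lock_alt
  cases htl : text.toList with
  | nil =>
    exact absurd (String.toList_eq_nil_iff.mp htl) hpre
  | cons h rest =>
    simp only []
    rw [pvSwap_eq_pvFlip, pv_foldl_eq rest [h] false, pv_splitOn_eq rest, pv_join_nil_eq_flatten]
    have := pv_proc_eq_enum (pvS rest) 0
    simp only [Nat.cast_zero] at this
    rw [List.flatten_cons, this]
    simp [pv_out_eq_proc rest false]
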